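-- pv_equiv track=rewrite | github.com/LYZ-Li/ECE592_GenAI_LogiTest | src/common/metrics.py | ordering_violations
-- ===== SOURCE A (Python) =====
-- from typing import List
--
-- def ordering_violations(
--     gold_signatures: List[str], predicted_signatures: List[str]
-- ) -> int:
--     """Count monotonicity violations in predicted vs. gold action order.
--
--     For each predicted action that appears in the gold plan, check whether
--     its gold-plan position is strictly after the previous matched position.
--     A violation occurs when a predicted action appears *earlier* in the gold
--     plan than the previously matched action.
--
--     Args:
--         gold_signatures: Action signatures from the oracle plan, in order.
--         predicted_signatures: Action signatures from the model's plan.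
--
--     Returns:
--         Number of ordering violations.
--     """
--     gold_positions = {sig: idx for idx, sig in enumerate(gold_signatures)}
--     violations = 0
--     previous_position = -1
--     for sig in predicted_signatures:
--         position = gold_positions.get(sig)
--         if position is None:
--             continue
--         if position < previous_position:
--             violations += 1
--         previous_position = position
--     return violations
-- ===== SOURCE B (Python) =====
-- from typing import List
--
-- def ordering_violations(
--     gold_signatures: List[str], predicted_signatures: List[str]
-- ) -> int:
--     # Different algorithm: the matched gold positions split into maximal
--     # non-decreasing runs; every run boundary is exactly one ordering
--     # violation, so violations = (number of runs) - 1 (0 when no match).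
--     gold_positions = {sig: idx for idx, sig in enumerate(gold_signatures)}
--     matched = [gold_positions[sig] for sig in predicted_signatures
--                if sig in gold_positions]
--     n = len(matched)
--     runs = 0
--     i = 0
--     while i < n:
--         runs += 1
--         j = i + 1
--         while j < n and matched[j - 1] <= matched[j]:
--             j += 1
--         i = j
--     return max(runs - 1, 0)
-- ===== Notes on version B (the rewrite author's own statement) =====
-- stated objective: alternative
-- what changed: Instead of counting descents against a running previous-position sentinel, B materializes the matched gold positions and counts the maximal non-decreasing runs with a nested index-advancing while loop, returning runs - 1 (clamped at 0): every run boundary is exactly one ordering violation.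
import Mathlib
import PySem

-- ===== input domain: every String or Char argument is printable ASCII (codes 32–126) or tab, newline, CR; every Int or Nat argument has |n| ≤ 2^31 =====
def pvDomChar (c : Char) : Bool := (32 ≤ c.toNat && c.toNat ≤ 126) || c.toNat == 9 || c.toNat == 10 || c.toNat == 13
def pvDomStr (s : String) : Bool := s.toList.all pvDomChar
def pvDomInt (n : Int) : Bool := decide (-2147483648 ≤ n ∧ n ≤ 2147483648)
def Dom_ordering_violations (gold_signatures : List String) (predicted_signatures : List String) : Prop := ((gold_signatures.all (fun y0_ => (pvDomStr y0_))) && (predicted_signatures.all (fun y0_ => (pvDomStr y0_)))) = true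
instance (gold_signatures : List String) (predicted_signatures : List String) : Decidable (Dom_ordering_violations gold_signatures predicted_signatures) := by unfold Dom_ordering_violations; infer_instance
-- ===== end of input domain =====

-- B counts maximal non-decreasing runs of the matched gold positions (violations = runs - 1,
-- clamped at 0) instead of A's descent count against a running previous-position sentinel;
-- a genuinely different counting algorithm of the same cost.


-- ===== PORT A =====
-- gold_positions = {sig: idx for idx, sig in enumerate(gold_signatures)}  (shared comprehension, both sources)
def goldPositions (gold_signatures : List String) : PySem.Dict String Int :=
  (PySem.List.enumerate gold_signatures 0).foldl
    (fun d is => d.insert is.2 is.1) PySem.Dict.empty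

def ordering_violations (gold_signatures : List String) (predicted_signatures : List String) : Int :=
  let gold_positions := goldPositions gold_signatures
  let st := predicted_signatures.foldl
    (fun (s : Int × Int) sig =>
      match gold_positions.get? sig with
      | none => s
      | some position => (if position < s.2 then s.1 + 1 else s.1, position))
    (0, -1)
  st.1

-- ===== PORT B =====
-- inner while:  while j < n and matched[j-1] <= matched[j]: j += 1
def runEnd (m : List Int) (n j : Nat) : Nat :=
  if j < n ∧ m.getD (j - 1) 0 ≤ m.getD j 0 then runEnd m n (j + 1) else j
termination_by n - j
decreasing_by omega

theorem runEnd_ge (m : List Int) (n j : Nat) : j ≤ runEnd m n j := by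
  unfold runEnd
  split
  · have := runEnd_ge m n (j + 1)
    omega
  · exact Nat.le_refl j
termination_by n - j
decreasing_by omega

-- outer while:  while i < n: runs += 1; j = runEnd(i+1); i = j
def countRunsIdx (m : List Int) (n i : Nat) (runs : Int) : Int :=
  if i < n then countRunsIdx m n (runEnd m n (i + 1)) (runs + 1) else runs
termination_by n - i
decreasing_by have := runEnd_ge m n (i + 1); omega

def ordering_violations_alt (gold_signatures : List String) (predicted_signatures : List String) : Int :=
  let gold_positions := goldPositions gold_signatures
  let matched := predicted_signatures.filterMap (fun sig => gold_positions.get? sig)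
  max (countRunsIdx matched matched.length 0 0 - 1) 0

-- ===== PRECONDITION & SPEC =====
def Spec_ordering_violations (gold_signatures : List String) (predicted_signatures : List String) (out : Int) : Prop := out = ordering_violations_alt gold_signatures predicted_signatures
instance (gold_signatures : List String) (predicted_signatures : List String) (out : Int) : Decidable (Spec_ordering_violations gold_signatures predicted_signatures out) := by unfold Spec_ordering_violations; infer_instance

-- ===== CLAIM (what is proved, stated in full; the proofs are below) =====
def Claim_equal_ordering_violations : Prop := ∀ (gold_signatures : List String) (predicted_signatures : List String), Dom_ordering_violations gold_signatures predicted_signatures → Spec_ordering_violations gold_signatures predicted_signatures (ordering_violations gold_signatures predicted_signatures)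

-- ===== LEMMAS AND PROOFS =====

-- number of adjacent "goes backwards" steps in prev :: ps  (characterises A's loop)
def cntViol : Int → List Int → Int
  | _, [] => 0
  | prev, p :: t => (if p < prev then 1 else 0) + cntViol p t

-- A's loop computes cntViol of the filtered positions, started at prev
theorem foldA_eq (gp : PySem.Dict String Int) (p : List String) :
    ∀ (v prev : Int),
      (p.foldl (fun (s : Int × Int) sig =>
        match gp.get? sig with
        | none => s
        | some position => (if position < s.2 then s.1 + 1 else s.1, position)) (v, prev)).1
      = v + cntViol prev (p.filterMap (fun sig => gp.get? sig)) := by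
  induction p with
  | nil => intro v prev; simp [cntViol]
  | cons x t ih =>
      intro v prev
      simp only [List.foldl_cons, List.filterMap_cons]
      cases h : gp.get? x with
      | none => simpa using ih v prev
      | some pos =>
          simp only [cntViol]
          rw [ih]
          split <;> omega

-- list-level versions of B's two while loops
def dropRun : Int → List Int → List Int
  | _, [] => []
  | p, q :: t => if p ≤ q then dropRun q t else q :: t

theorem dropRun_length_le (p : Int) (t : List Int) : (dropRun p t).length ≤ t.length := by
  induction t generalizing p with
  | nil => simp [dropRun]
  | cons q t' ih =>
      simp only [dropRun]
      split
      · exact Nat.le_trans (ih q) (by simp)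
      · simp

def countRunsL : List Int → Int
  | [] => 0
  | p :: t =>
      have : (dropRun p t).length ≤ t.length := dropRun_length_le p t
      1 + countRunsL (dropRun p t)
termination_by l => l.length
decreasing_by simp only [List.length_cons]; omega

-- the index-based inner while agrees with dropRun on the suffix
theorem runEnd_drop (m : List Int) (j : Nat) (hj : j < m.length) :
    m.drop (runEnd m m.length (j + 1)) = dropRun (m.getD j 0) (m.drop (j + 1)) := by
  rw [runEnd]
  by_cases h : j + 1 < m.length ∧ m.getD j 0 ≤ m.getD (j + 1) 0
  · rw [if_pos (by simpa using h)]
    obtain ⟨h1, h2⟩ := h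
    have hd : m.drop (j + 1) = m.getD (j + 1) 0 :: m.drop (j + 2) := by
      rw [List.getD_eq_getElem _ _ h1, ← List.getElem_cons_drop h1]
    rw [hd, dropRun, if_pos h2]
    exact runEnd_drop m (j + 1) h1
  · rw [if_neg (by simpa using h)]
    by_cases h1 : j + 1 < m.length
    · have h2 : ¬ m.getD j 0 ≤ m.getD (j + 1) 0 := fun hc => h ⟨h1, hc⟩
      have hd : m.drop (j + 1) = m.getD (j + 1) 0 :: m.drop (j + 2) := by
        rw [List.getD_eq_getElem _ _ h1, ← List.getElem_cons_drop h1]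
      rw [hd, dropRun, if_neg h2, ← hd]
    · have hnil : m.drop (j + 1) = [] := List.drop_eq_nil_of_le (by omega)
      simp [hnil, dropRun]
termination_by m.length - j
decreasing_by omega

-- the index-based outer while agrees with countRunsL on the suffix
theorem countRunsIdx_eq (m : List Int) : ∀ (i : Nat) (runs : Int),
    countRunsIdx m m.length i runs = runs + countRunsL (m.drop i) := by
  intro i
  induction hn : m.length - i using Nat.strong_induction_on generalizing i with
  | _ k ih =>
      intro runs
      rw [countRunsIdx]
      by_cases hi : i < m.length
      · rw [if_pos hi]
        have hd : m.drop i = m.getD i 0 :: m.drop (i + 1) := by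
          rw [List.getD_eq_getElem _ _ hi, ← List.getElem_cons_drop hi]
        rw [hd, countRunsL, ← runEnd_drop m i hi]
        have hge := runEnd_ge m m.length (i + 1)
        have := ih (m.length - runEnd m m.length (i + 1)) (by omega)
            (runEnd m m.length (i + 1)) rfl (runs + 1)
        rw [this]
        ring
      · rw [if_neg hi, List.drop_eq_nil_of_le (by omega), countRunsL]
        ring

-- run count vs descent count
theorem countRunsL_dropRun (t : List Int) : ∀ p, countRunsL (dropRun p t) = cntViol p t := by
  induction t with
  | nil => intro p; simp [dropRun, cntViol, countRunsL]
  | cons q t' ih =>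
      intro p
      by_cases h : p ≤ q
      · rw [dropRun, if_pos h, cntViol, if_neg (by omega), ih q]
        ring
      · rw [dropRun, if_neg h, countRunsL, cntViol, if_pos (by omega), ih q]

theorem cntViol_nonneg (t : List Int) : ∀ p, 0 ≤ cntViol p t := by
  induction t with
  | nil => intro p; simp [cntViol]
  | cons q t' ih =>
      intro p
      rw [cntViol]
      have := ih q
      split <;> omega

-- every value looked up in goldPositions is a nonnegative enumerate index
theorem goldPositions_nonneg (g : List String) :
    ∀ sig pos, (goldPositions g).get? sig = some pos → 0 ≤ pos := by
  unfold goldPositions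
  suffices h : ∀ (l : List (Int × String)) (d : PySem.Dict String Int),
      (∀ q ∈ l, 0 ≤ q.1) →
      (∀ sig pos, d.get? sig = some pos → 0 ≤ pos) →
      (∀ sig pos, (l.foldl (fun d is => d.insert is.2 is.1) d).get? sig = some pos → 0 ≤ pos) by
    intro sig pos hp
    refine h _ _ ?_ ?_ sig pos hp
    · intro q hq
      obtain ⟨k, hk, rfl⟩ := (PySem.List.mem_enumerate_iff _ _ _).mp hq
      omega
    · intro sig pos h0; simp [PySem.Dict.get?_empty] at h0
  intro l
  induction l with
  | nil => intro d _ hd; simpa using hd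
  | cons q t ih =>
      intro d hl hd
      simp only [List.foldl_cons]
      refine ih _ (fun r hr => hl r (by simp [hr])) ?_
      intro sig pos h0
      rw [PySem.Dict.get?_insert] at h0
      split at h0
      · exact (Option.some_inj.mp h0) ▸ hl q (by simp)
      · exact hd sig pos h0

-- ===== VERDICT (by name: the statement is the Claim_ definition above) =====
theorem ordering_violations_spec : Claim_equal_ordering_violations := by
  intro g p _
  unfold Spec_ordering_violations ordering_violations ordering_violations_alt
  dsimp only
  rw [foldA_eq, zero_add, countRunsIdx_eq, List.drop_zero, zero_add]
  have hpos : ∀ q ∈ p.filterMap (fun sig => (goldPositions g).get? sig), 0 ≤ q := by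
    intro q hq
    obtain ⟨sig, _, hget⟩ := List.mem_filterMap.mp hq
    exact goldPositions_nonneg g sig q hget
  cases hm : p.filterMap (fun sig => (goldPositions g).get? sig) with
  | nil => simp [cntViol, countRunsL]
  | cons x t =>
      have hx : 0 ≤ x := hpos x (by rw [hm]; simp)
      rw [cntViol, if_neg (by omega), countRunsL, countRunsL_dropRun]
      have := cntViol_nonneg t x
      omega
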